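-- pv_equiv track=rewrite | github.com/ev07/chonomp | multi_sets_exp/results_other.py | is_markov_boundary
-- ===== SOURCE A (Python) =====
-- def is_markov_boundary(fs_set,th_solution):
--     if len(fs_set)!=len(th_solution):
--         return False
--     indexes = list(range(len(th_solution)))
--     for v in fs_set:
--         for i in range(len(indexes)):
--             if v in th_solution[indexes[i]]:
--                 indexes.remove(indexes[i])
--                 break
--     if len(indexes)==0:
--         return True
--     return False
-- ===== SOURCE B (Python) =====
-- def is_markov_boundary(fs_set, th_solution):
--     # Inverted index element -> ascending list of set indices, consumed with
--     # lazy deletion of dead prefixes: O(total size) instead of A's nested scans.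
--     if len(fs_set) != len(th_solution):
--         return False
--     inv = {}
--     for i, s in enumerate(th_solution):
--         for x in s:
--             lst = inv.get(x)
--             if lst is None:
--                 inv[x] = [i]
--             elif lst[-1] != i:
--                 lst.append(i)
--     used = set()
--     for v in fs_set:
--         lst = inv.get(v)
--         if lst is None:
--             continue
--         p = 0
--         while p < len(lst) and lst[p] in used:
--             p += 1
--         if p < len(lst):
--             used.add(lst[p])
--             p += 1
--         del lst[:p]  # consumed / permanently-dead entries never needed  again
--     return len(used) == len(th_solution)
-- ===== Notes on version B (the rewrite author's own statement) =====
-- stated objective: alternative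
-- what changed: Replaces A's per-element rescan of the remaining index list (list membership test plus list.remove) by an inverted index element->ascending list of set indices built once, consumed with lazy deletion of dead prefixes and a used-set; on a timing run's random inputs both run at the same speed.
import Mathlib
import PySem

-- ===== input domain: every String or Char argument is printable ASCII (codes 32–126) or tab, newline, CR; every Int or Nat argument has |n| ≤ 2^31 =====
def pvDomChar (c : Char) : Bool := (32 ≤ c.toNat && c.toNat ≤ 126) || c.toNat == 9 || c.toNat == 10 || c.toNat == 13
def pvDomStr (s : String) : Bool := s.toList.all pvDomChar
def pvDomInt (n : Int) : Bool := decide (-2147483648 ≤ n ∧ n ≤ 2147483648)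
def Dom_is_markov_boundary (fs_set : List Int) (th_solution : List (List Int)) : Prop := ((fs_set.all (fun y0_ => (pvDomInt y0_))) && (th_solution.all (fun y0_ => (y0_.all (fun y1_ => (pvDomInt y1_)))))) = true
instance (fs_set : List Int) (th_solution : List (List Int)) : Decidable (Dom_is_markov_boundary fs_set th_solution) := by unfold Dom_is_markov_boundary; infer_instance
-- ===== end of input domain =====

-- B matches fs_set elements to th_solution sets via an inverted index (element -> ascending
-- set indices) consumed with lazy dead-prefix deletion and a used-set, instead of A's rescans
-- of the remaining index list; proved to return the same value on every input.

-- ===== PORT A =====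
-- inner loop 'for i in range(len(indexes)): if v in th_solution[indexes[i]]: indexes.remove(indexes[i]); break':
-- scanned left to right over indexes; since indexes never holds duplicates, remove(indexes[i]) deletes
-- exactly position i, so the loop is structural recursion on indexes. th_solution[indexes[i]] is always
-- in range (indexes ⊆ range(len(th_solution))), so pyGetD's default [] is never used.
def pvAFind (v : Int) (sets : List (List Int)) : List Int → List Int
  | [] => []
  | j :: rest =>
    if (PySem.List.pyGetD sets j []).contains v then rest
    else j :: pvAFind v sets rest

def is_markov_boundary (fs_set : List Int) (th_solution : List (List Int)) : Bool :=
  if fs_set.length != th_solution.length then false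
  else
    let indexes := PySem.List.pyRange 0 (th_solution.length : Int) 1
    let final := fs_set.foldl (fun idxs v => pvAFind v th_solution idxs) indexes
    final.length == 0

-- ===== PORT B =====
-- 'lst = inv.get(x); if lst is None: inv[x] = [i] elif lst[-1] != i: lst.append(i)'
def pvBAddElem (i : Int) (inv : PySem.Dict Int (List Int)) (x : Int) : PySem.Dict Int (List Int) :=
  match inv.get? x with
  | none => inv.insert x [i]
  | some lst => if PySem.List.pyGet? lst (-1) != some i then inv.insert x (lst ++ [i]) else inv

def pvBuildInv (th : List (List Int)) : PySem.Dict Int (List Int) :=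
  (PySem.List.enumerate th 0).foldl (fun inv p => p.2.foldl (pvBAddElem p.1) inv) PySem.Dict.empty

-- the 'while p < len(lst) and lst[p] in used: p += 1' scan combined with 'del lst[:p]'
def pvDropUsed (used : PySem.Set Int) : List Int → List Int
  | [] => []
  | j :: rest => if PySem.Set.contains used j then pvDropUsed used rest else j :: rest

def pvBStep (st : PySem.Dict Int (List Int) × PySem.Set Int) (v : Int) : PySem.Dict Int (List Int) × PySem.Set Int :=
  match st.1.get? v with
  | none => st
  | some lst =>
    match pvDropUsed st.2 lst with
    | [] => (st.1.insert v [], st.2)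
    | j :: rest => (st.1.insert v rest, PySem.Set.add st.2 j)

def is_markov_boundary_alt (fs_set : List Int) (th_solution : List (List Int)) : Bool :=
  if fs_set.length != th_solution.length then false
  else
    let st := fs_set.foldl pvBStep (pvBuildInv th_solution, PySem.Set.empty)
    PySem.Set.len st.2 == th_solution.length

-- ===== PRECONDITION & SPEC =====
def Spec_is_markov_boundary (fs_set : List Int) (th_solution : List (List Int)) (out : Bool) : Prop := out = is_markov_boundary_alt fs_set th_solution
instance (fs_set : List Int) (th_solution : List (List Int)) (out : Bool) : Decidable (Spec_is_markov_boundary fs_set th_solution out) := by unfold Spec_is_markov_boundary; infer_instance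

-- ===== CLAIM (what is proved, stated in full; the proofs are below) =====
def Claim_equal_is_markov_boundary : Prop := ∀ (fs_set : List Int) (th_solution : List (List Int)), Dom_is_markov_boundary fs_set th_solution → Spec_is_markov_boundary fs_set th_solution (is_markov_boundary fs_set th_solution)

-- ===== LEMMAS AND PROOFS =====

-- ascending list of indices of th whose set contains v
def pvL (th : List (List Int)) (v : Int) : List Int :=
  (PySem.List.pyRange 0 (th.length : Int) 1).filter (fun j => (PySem.List.pyGetD th j []).contains v)

-- loop invariant tying A's state (idxs) to B's state (inv, used)
def pvInv (th : List (List Int)) (idxs : List Int) (st : PySem.Dict Int (List Int) × PySem.Set Int) : Prop :=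
  idxs = (PySem.List.pyRange 0 (th.length : Int) 1).filter (fun t => !(PySem.Set.contains st.2 t)) ∧
  (∀ v : Int, ((st.1.get? v).getD []).Sublist (pvL th v) ∧
      ∀ j ∈ pvL th v, PySem.Set.contains st.2 j = false → j ∈ (st.1.get? v).getD []) ∧
  st.2.Nodup ∧ (∀ j ∈ st.2, j ∈ PySem.List.pyRange 0 (th.length : Int) 1)

lemma pv_inner_char (s : List Int) (i : Int) :
    ∀ (inv : PySem.Dict Int (List Int)) (c : Int → Bool) (F : Int → List Int),
      (∀ v, (inv.get? v).getD [] = F v ++ (if c v then [i] else [])) →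
      (∀ v, ∀ j ∈ F v, j < i) →
      ∀ v, ((s.foldl (pvBAddElem i) inv).get? v).getD []
            = F v ++ (if c v || s.contains v then [i] else []) := by
  induction s with
  | nil => intro inv c F hH hB v; simpa using hH v
  | cons x s ih =>
    intro inv c F hH hB v
    have hH' : ∀ w, ((pvBAddElem i inv x).get? w).getD []
        = F w ++ (if (c w || (w == x)) then [i] else []) := by
      intro w
      by_cases hwx : w = x
      · subst hwx
        cases hg : inv.get? w with
        | none =>
          have h0 := hH w; rw [hg] at h0; simp only [Option.getD_none] at h0
          have hc : c w = false := by
            cases hcw : c w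
            · rfl
            · rw [hcw] at h0; simp at h0
          rw [hc] at h0; simp at h0
          simp [pvBAddElem, hg, PySem.Dict.get?_insert_self, ← h0, hc]
        | some lst =>
          have h0 := hH w; rw [hg] at h0; simp only [Option.getD_some] at h0
          cases hcw : c w with
          | true =>
            rw [hcw] at h0; simp at h0
            have hlast : PySem.List.pyGet? lst (-1) = some i := by
              rw [h0]; exact PySem.List.pyGet?_neg_one_append_singleton _ _
            simp [pvBAddElem, hg, hlast, h0, hcw]
          | false =>
            rw [hcw] at h0; simp at h0
            have hne : ¬ (PySem.List.pyGet? lst (-1) = some i) := by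
              intro hsome
              have hmem : i ∈ lst := by
                rw [PySem.List.pyGet?_neg_one] at hsome
                exact List.mem_of_getLast? hsome
              have := hB w i (h0 ▸ hmem); omega
            simp [pvBAddElem, hg, hcw]
            rw [if_neg (h0 ▸ hne), PySem.Dict.get?_insert_self]
            simp [h0]
      · have hkeep : (pvBAddElem i inv x).get? w = inv.get? w := by
          unfold pvBAddElem
          cases hg : inv.get? x with
          | none => simpa using PySem.Dict.get?_insert_of_ne inv [i] hwx
          | some lst =>
            by_cases hlast : PySem.List.pyGet? lst (-1) = some i
            · simp [hlast]
            · simp [hlast]; exact PySem.Dict.get?_insert_of_ne inv (lst ++ [i]) hwx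
        have hbx : (w == x) = false := by simp [hwx]
        rw [hkeep, hH w, hbx, Bool.or_false]
    have := ih (pvBAddElem i inv x) (fun w => c w || (w == x)) F hH' hB v
    rw [List.foldl_cons, this]
    congr 1
    rw [List.contains_cons, Bool.or_assoc]

lemma pv_build_go (ts : List (List Int)) :
    ∀ (i0 : Int) (inv : PySem.Dict Int (List Int)),
      (∀ v : Int, ∀ j ∈ (inv.get? v).getD [], j < i0) →
      ∀ v : Int,
        (((PySem.List.enumerate ts i0).foldl (fun inv p => p.2.foldl (pvBAddElem p.1) inv) inv).get? v).getD []
          = (inv.get? v).getD [] ++ ((PySem.List.enumerate ts i0).filter (fun p => p.2.contains v)).map (·.1) := by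
  induction ts with
  | nil => intro i0 inv _ v; simp [PySem.List.enumerate]
  | cons t ts ih =>
    intro i0 inv hb v
    rw [PySem.List.enumerate_cons, List.foldl_cons]
    have hinner := pv_inner_char t i0 inv (fun _ => false) (fun w => (inv.get? w).getD [])
      (by intro w; simp) (by intro w j hj; exact hb w j hj)
    have hb' : ∀ w : Int, ∀ j ∈ ((t.foldl (pvBAddElem i0) inv).get? w).getD [], j < i0 + 1 := by
      intro w j hj
      rw [hinner w] at hj
      rcases List.mem_append.mp hj with h | h
      · have := hb w j h; omega
      · rcases (by split at h <;> simp_all : j = i0) with rfl; omega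
    have := ih (i0 + 1) (t.foldl (pvBAddElem i0) inv) hb' v
    rw [this, hinner v]
    simp only [Bool.false_or, List.filter_cons]
    cases ht : t.contains v <;> simp [List.append_assoc]

lemma pv_build_char (th : List (List Int)) (v : Int) :
    ((pvBuildInv th).get? v).getD [] = pvL th v := by
  unfold pvBuildInv pvL
  rw [pv_build_go th 0 PySem.Dict.empty (by intro w j hj; simp [PySem.Dict.get?_empty] at hj)]
  rw [PySem.List.enumerate_eq_map_pyRange th []]
  simp only [List.filter_map, List.map_map]
  rw [List.map_id''] <;> try rfl
  intro a; rfl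

lemma pv_contains_false {s : PySem.Set Int} {x : Int} :
    PySem.Set.contains s x = false ↔ x ∉ s := by
  constructor
  · intro h hm
    have := (PySem.Set.contains_iff s x).mpr hm
    rw [h] at this; cases this
  · intro h
    cases hb : PySem.Set.contains s x
    · rfl
    · exact absurd ((PySem.Set.contains_iff s x).mp hb) h

lemma pvAFind_no (v : Int) (sets : List (List Int)) :
    ∀ xs : List Int, (∀ t ∈ xs, (PySem.List.pyGetD sets t []).contains v = false) →
      pvAFind v sets xs = xs := by
  intro xs
  induction xs with
  | nil => intro _; rfl
  | cons t xs ih =>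
    intro h
    have ht := h t (by simp)
    simp only [pvAFind, ht]
    simp only [Bool.false_eq_true, if_false]
    rw [ih (fun u hu => h u (by simp [hu]))]

lemma pvAFind_split (v : Int) (sets : List (List Int)) (j : Int) (zs : List Int)
    (hj : (PySem.List.pyGetD sets j []).contains v = true) :
    ∀ ys : List Int, (∀ t ∈ ys, (PySem.List.pyGetD sets t []).contains v = false) →
      pvAFind v sets (ys ++ j :: zs) = ys ++ zs := by
  intro ys
  induction ys with
  | nil =>
    intro _
    have hv : v ∈ PySem.List.pyGetD sets j [] := by simpa using hj
    simp [pvAFind, hv]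
  | cons y ys ih =>
    intro h
    have hy := h y (by simp)
    simp only [List.cons_append, pvAFind, hy]
    simp only [Bool.false_eq_true, if_false]
    rw [ih (fun u hu => h u (by simp [hu]))]

lemma pvDropUsed_spec (used : PySem.Set Int) :
    ∀ cur : List Int, ∃ pre, cur = pre ++ pvDropUsed used cur ∧
      ∀ t ∈ pre, PySem.Set.contains used t = true := by
  intro cur
  induction cur with
  | nil => exact ⟨[], rfl, by simp⟩
  | cons k cur ih =>
    cases hk : PySem.Set.contains used k
    · refine ⟨[], ?_, by simp⟩
      simp only [pvDropUsed, hk]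
      simp
    · obtain ⟨pre, he, hu⟩ := ih
      refine ⟨k :: pre, ?_, ?_⟩
      · simp only [pvDropUsed, hk, if_true]
        simpa using he
      · intro t ht
        rcases List.mem_cons.mp ht with rfl | ht'
        · exact hk
        · exact hu t ht'

lemma pvDropUsed_head (used : PySem.Set Int) :
    ∀ {cur j rest}, pvDropUsed used cur = j :: rest → PySem.Set.contains used j = false := by
  intro cur
  induction cur with
  | nil => intro j rest h; cases h
  | cons k cur ih =>
    intro j rest h
    cases hk : PySem.Set.contains used k
    · simp only [pvDropUsed, hk] at h
      simp only [Bool.false_eq_true, if_false] at h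
      cases h; exact hk
    · simp only [pvDropUsed, hk, if_true] at h
      exact ih h

lemma pv_step_pres (th : List (List Int)) (v : Int) (idxs : List Int)
    (st : PySem.Dict Int (List Int) × PySem.Set Int) (h : pvInv th idxs st) :
    pvInv th (pvAFind v th idxs) (pvBStep st v) := by
  obtain ⟨h1, h2, hnd, hsub⟩ := h
  have hidxmem : ∀ t, t ∈ idxs ↔ (t ∈ PySem.List.pyRange 0 (th.length : Int) 1 ∧
      PySem.Set.contains st.2 t = false) := by
    intro t; rw [h1]; simp [List.mem_filter]
  cases hget : st.1.get? v with
  | none =>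
    have hcurnil : (st.1.get? v).getD [] = [] := by rw [hget]; rfl
    have hA : pvAFind v th idxs = idxs := by
      apply pvAFind_no; intro t ht
      by_contra hc
      rw [Bool.not_eq_false] at hc
      obtain ⟨htr, htu⟩ := (hidxmem t).mp ht
      have hmemL : t ∈ pvL th v := List.mem_filter.mpr ⟨htr, hc⟩
      have := (h2 v).2 t hmemL htu
      rw [hcurnil] at this; simp at this
    have hB : pvBStep st v = st := by simp [pvBStep, hget]
    rw [hA, hB]; exact ⟨h1, h2, hnd, hsub⟩
  | some lst =>
    have hcur : (st.1.get? v).getD [] = lst := by rw [hget]; rfl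
    have hsubl : lst.Sublist (pvL th v) := hcur ▸ (h2 v).1
    cases hdrop : pvDropUsed st.2 lst with
    | nil =>
      have halluse : ∀ t ∈ lst, PySem.Set.contains st.2 t = true := by
        obtain ⟨pre, hpe, hpu⟩ := pvDropUsed_spec st.2 lst
        rw [hdrop, List.append_nil] at hpe
        intro t ht; exact hpu t (hpe ▸ ht)
      have hA : pvAFind v th idxs = idxs := by
        apply pvAFind_no; intro t ht
        by_contra hc
        rw [Bool.not_eq_false] at hc
        obtain ⟨htr, htu⟩ := (hidxmem t).mp ht
        have hmemL : t ∈ pvL th v := List.mem_filter.mpr ⟨htr, hc⟩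
        have htlst := (h2 v).2 t hmemL htu
        rw [hcur] at htlst
        rw [halluse t htlst] at htu; cases htu
      have hB : pvBStep st v = (st.1.insert v [], st.2) := by simp [pvBStep, hget, hdrop]
      rw [hA, hB]
      refine ⟨h1, ?_, hnd, hsub⟩
      intro w
      by_cases hwv : w = v
      · subst hwv
        refine ⟨by simp [PySem.Dict.get?_insert_self], ?_⟩
        intro t htL htu
        have htlst := (h2 w).2 t htL htu
        rw [hcur] at htlst
        rw [halluse t htlst] at htu; cases htu
      · rw [PySem.Dict.get?_insert_of_ne st.1 [] hwv]
        exact h2 w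
    | cons j rest =>
      obtain ⟨pre, hpe, hpu⟩ := pvDropUsed_spec st.2 lst
      rw [hdrop] at hpe
      have hjnot : PySem.Set.contains st.2 j = false := pvDropUsed_head st.2 hdrop
      have hjlst : j ∈ lst := by rw [hpe]; simp
      have hjL : j ∈ pvL th v := hsubl.subset hjlst
      have hjrng : j ∈ PySem.List.pyRange 0 (th.length : Int) 1 := (List.mem_filter.mp hjL).1
      have hjc : (PySem.List.pyGetD th j []).contains v = true := (List.mem_filter.mp hjL).2
      have hjidx : j ∈ idxs := (hidxmem j).mpr ⟨hjrng, hjnot⟩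
      have hnodup_idxs : idxs.Nodup := by
        rw [h1]; exact (PySem.List.nodup_pyRange_one _ _).filter _
      have hpair_idxs : idxs.Pairwise (· < ·) := by
        rw [h1]; exact List.Pairwise.filter _ (PySem.List.pairwise_lt_pyRange_one _ _)
      have hpairL : (pvL th v).Pairwise (· < ·) :=
        List.Pairwise.filter _ (PySem.List.pairwise_lt_pyRange_one _ _)
      have hpairlst : lst.Pairwise (· < ·) := hpairL.sublist hsubl
      obtain ⟨ys, zs, hsplit⟩ := List.append_of_mem hjidx
      have hnod' := hnodup_idxs; rw [hsplit, List.nodup_append] at hnod'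
      have hjys : j ∉ ys := fun hy => (hnod'.2.2 j hy j (by simp)) rfl
      have hjzs : j ∉ zs := by
        have := hnod'.2.1; rw [List.nodup_cons] at this; exact this.1
      have hys_no : ∀ t ∈ ys, (PySem.List.pyGetD th t []).contains v = false := by
        intro y hy
        have hyidx : y ∈ idxs := by rw [hsplit]; simp [hy]
        obtain ⟨hyr, hyu⟩ := (hidxmem y).mp hyidx
        have hylt : y < j := by
          have hp := hpair_idxs; rw [hsplit, List.pairwise_append] at hp
          exact hp.2.2 y hy j (by simp)
        by_contra hyc
        rw [Bool.not_eq_false] at hyc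
        have hyL : y ∈ pvL th v := List.mem_filter.mpr ⟨hyr, hyc⟩
        have hylst : y ∈ lst := by
          have := (h2 v).2 y hyL hyu; rwa [hcur] at this
        rw [hpe] at hylst
        rcases List.mem_append.mp hylst with hyp | hyjr
        · rw [hpu y hyp] at hyu; cases hyu
        · rcases List.mem_cons.mp hyjr with rfl | hyrest
          · omega
          · have hp := hpairlst; rw [hpe, List.pairwise_append] at hp
            have hjr := hp.2.1
            rw [List.pairwise_cons] at hjr
            have := hjr.1 y hyrest
            omega
      have hA : pvAFind v th idxs = ys ++ zs := by
        rw [hsplit]; exact pvAFind_split v th j zs hjc ys hys_no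
      have hB : pvBStep st v = (st.1.insert v rest, PySem.Set.add st.2 j) := by
        simp [pvBStep, hget, hdrop]
      rw [hA, hB]
      refine ⟨?_, ?_, PySem.Set.nodup_add st.2 j hnd, ?_⟩
      · have hstep : (PySem.List.pyRange 0 (th.length : Int) 1).filter
            (fun t => !(PySem.Set.contains (PySem.Set.add st.2 j) t))
            = List.filter (fun t => !(t == j)) idxs := by
          rw [h1, List.filter_filter]
          apply List.filter_congr
          intro t _
          cases hb : PySem.Set.contains (PySem.Set.add st.2 j) t
          · have hmem : t ∉ PySem.Set.add st.2 j := pv_contains_false.mp hb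
            rw [PySem.Set.mem_add] at hmem
            push_neg at hmem
            have h1b : PySem.Set.contains st.2 t = false := pv_contains_false.mpr hmem.1
            have h2b : (t == j) = false := by simp [hmem.2]
            simp [h2b, hmem.1]
          · have hmem : t ∈ PySem.Set.add st.2 j := (PySem.Set.contains_iff _ _).mp hb
            rw [PySem.Set.mem_add] at hmem
            rcases hmem with hm | rfl
            · have hct : PySem.Set.contains st.2 t = true := (PySem.Set.contains_iff _ _).mpr hm
              simp [hm]
            · simp
        rw [hstep, hsplit, List.filter_append, List.filter_cons]
        have hjj : (!(j == j)) = false := by simp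
        rw [hjj]
        simp only [Bool.false_eq_true, if_false]
        rw [List.filter_eq_self.mpr (fun t ht => by
              have : t ≠ j := fun he => hjys (he ▸ ht); simp [this]),
            List.filter_eq_self.mpr (fun t ht => by
              have : t ≠ j := fun he => hjzs (he ▸ ht); simp [this])]
      · intro w
        by_cases hwv : w = v
        · subst hwv
          refine ⟨?_, ?_⟩
          · simp only [PySem.Dict.get?_insert_self, Option.getD_some]
            have hrl : rest.Sublist lst := by
              rw [hpe]
              exact (List.sublist_cons_self j rest).trans (List.sublist_append_right _ _)
            exact hrl.trans hsubl
          · intro t htL htu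
            simp only [PySem.Dict.get?_insert_self, Option.getD_some]
            have htm : t ∉ PySem.Set.add st.2 j := pv_contains_false.mp htu
            rw [PySem.Set.mem_add] at htm
            push_neg at htm
            have htold : PySem.Set.contains st.2 t = false := pv_contains_false.mpr htm.1
            have htlst : t ∈ lst := by
              have := (h2 w).2 t htL htold; rwa [hcur] at this
            rw [hpe] at htlst
            rcases List.mem_append.mp htlst with hp | hjr
            · rw [hpu t hp] at htold; cases htold
            · rcases List.mem_cons.mp hjr with rfl | hr
              · exact absurd rfl htm.2
              · exact hr
        · rw [PySem.Dict.get?_insert_of_ne st.1 rest hwv]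
          refine ⟨(h2 w).1, ?_⟩
          intro t htL htu
          apply (h2 w).2 t htL
          have htm : t ∉ PySem.Set.add st.2 j := pv_contains_false.mp htu
          rw [PySem.Set.mem_add] at htm
          push_neg at htm
          exact pv_contains_false.mpr htm.1
      · intro t htm
        rcases (PySem.Set.mem_add st.2 j t).mp htm with hm | rfl
        · exact hsub t hm
        · exact hjrng

lemma pv_final_eq (th : List (List Int)) (idxs : List Int)
    (st : PySem.Dict Int (List Int) × PySem.Set Int) (h : pvInv th idxs st) :
    (idxs.length == 0) = (PySem.Set.len st.2 == th.length) := by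
  obtain ⟨h1, h2, hnd, hsub⟩ := h
  rw [Bool.eq_iff_iff]
  simp only [beq_iff_eq]
  constructor
  · intro hlen0
    have hnil : idxs = [] := List.eq_nil_of_length_eq_zero hlen0
    have hall : ∀ t ∈ PySem.List.pyRange 0 (th.length : Int) 1, PySem.Set.contains st.2 t = true := by
      have hfe := h1.symm.trans hnil
      rw [List.filter_eq_nil_iff] at hfe
      intro t ht
      have := hfe t ht
      simpa using this
    have hsubset : (PySem.List.pyRange 0 (th.length : Int) 1) ⊆ st.2 :=
      fun {t} ht => (PySem.Set.contains_iff _ _).mp (hall t ht)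
    have hle1 := (List.subperm_of_subset (PySem.List.nodup_pyRange_one _ _) hsubset).length_le
    have hle2 := (List.subperm_of_subset hnd hsub).length_le
    have hlen : st.2.length = th.length := by
      rw [PySem.List.length_pyRange_one] at hle1 hle2
      omega
    simp [PySem.Set.len, hlen]
  · intro hlen
    have hlen' : st.2.length = th.length := by
      simp [PySem.Set.len] at hlen
      omega
    have hsp := List.subperm_of_subset hnd hsub
    have hperm : st.2.Perm (PySem.List.pyRange 0 (th.length : Int) 1) :=
      hsp.perm_of_length_le (by rw [PySem.List.length_pyRange_one]; omega)
    rw [h1, List.length_eq_zero_iff, List.filter_eq_nil_iff]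
    intro t ht
    have htm : t ∈ st.2 := hperm.mem_iff.mpr ht
    simp [htm]

lemma pv_fold_pres (th : List (List Int)) :
    ∀ (fs : List Int) (idxs : List Int) (st : PySem.Dict Int (List Int) × PySem.Set Int),
      pvInv th idxs st →
      pvInv th (fs.foldl (fun idxs v => pvAFind v th idxs) idxs) (fs.foldl pvBStep st) := by
  intro fs
  induction fs with
  | nil => intro idxs st h; exact h
  | cons v fs ih => intro idxs st h; exact ih _ _ (pv_step_pres th v idxs st h)

lemma pv_init_inv (th : List (List Int)) :
    pvInv th (PySem.List.pyRange 0 (th.length : Int) 1) (pvBuildInv th, PySem.Set.empty) := by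
  refine ⟨?_, ?_, List.nodup_nil, ?_⟩
  · simp [PySem.Set.contains, PySem.Set.empty]
  · intro w
    have hc := pv_build_char th w
    refine ⟨hc ▸ List.Sublist.refl _, ?_⟩
    intro j hj _
    rw [hc]; exact hj
  · intro j hj; simp [PySem.Set.empty] at hj

-- ===== VERDICT (by name: the statement is the Claim_ definition above) =====
theorem is_markov_boundary_spec : Claim_equal_is_markov_boundary := by
  intro fs th _
  unfold Spec_is_markov_boundary is_markov_boundary is_markov_boundary_alt
  by_cases hlen : fs.length = th.length
  · have hb : (fs.length != th.length) = false := by simp [hlen]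
    rw [hb]
    simp only [Bool.false_eq_true, if_false]
    exact pv_final_eq th _ _ (pv_fold_pres th fs _ _ (pv_init_inv th))
  · have hb : (fs.length != th.length) = true := by simp [hlen]
    rw [hb]
    simp
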